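-- pv_equiv track=rewrite | github.com/lucasvrm/pd-google | routers/crm_communication.py | email_contains_contacts
-- ===== SOURCE A (Python) =====
-- from typing import List, Literal, Optional, Tuple
--
-- def extract_email_addresses(email_string: Optional[str]) -> List[str]:
--     """
--     Extract individual email addresses from a comma-separated string.
--     Returns normalized (lowercase, stripped) email addresses.
--     """
--     if not email_string:
--         return []
--
--     # Simple parsing - split by comma and clean
--     emails = []
--     for part in email_string.split(','):
--         # Remove angle brackets and extract email if present (e.g., "Name <email@example.com>")
--         if '<' in part and '>' in part:
--             email = part.split('<')[1].split('>')[0].strip().lower()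
--         else:
--             email = part.strip().lower()
--
--         if email and '@' in email:
--             emails.append(email)
--
--     return emails
--
-- def email_contains_contacts(
--     from_email: Optional[str],
--     to_email: Optional[str],
--     cc_email: Optional[str],
--     bcc_email: Optional[str],
--     contact_emails: List[str]
-- ) -> Tuple[bool, List[str]]:
--     """
--     Check if any contact emails appear in the email's from/to/cc/bcc fields.
--     Returns (matches_found, list_of_matched_contacts).
--     """
--     if not contact_emails:
--         return False, []
--
--     # Normalize contact emails
--     contact_set = set(email.lower().strip() for email in contact_emails)
--     matched = set()
--
--     # Check all email fields
--     for field in [from_email, to_email, cc_email, bcc_email]: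
--         if field:
--             field_emails = extract_email_addresses(field)
--             for email in field_emails:
--                 if email in contact_set:
--                     matched.add(email)
--
--     return len(matched) > 0, sorted(list(matched))
-- ===== SOURCE B (Python) =====
-- from typing import List, Optional, Tuple
--
-- def extract_email_addresses(email_string: Optional[str]) -> List[str]:
--     if not email_string:
--         return []
--     emails = []
--     for part in email_string.split(','):
--         if '<' in part and '>' in part:
--             email = part.split('<')[1].split('>')[0].strip().lower()
--         else:
--             email = part.strip().lower()
--         if email and '@' in email:
--             emails.append(email)
--     return emails
--
-- def email_contains_contacts(
--     from_email: Optional[str],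
--     to_email: Optional[str],
--     cc_email: Optional[str],
--     bcc_email: Optional[str],
--     contact_emails: List[str],
-- ) -> Tuple[bool, List[str]]:
--     # Sort-merge intersection: sort both deduplicated sides once, then walk
--     # them with two pointers; the matches come out already sorted.
--     contacts = sorted({c.lower().strip() for c in contact_emails})
--     fields = sorted({e for f in (from_email, to_email, cc_email, bcc_email)
--                        for e in extract_email_addresses(f)})
--     i = j = 0
--     matched = []
--     while i < len(contacts) and j < len(fields):
--         if contacts[i] < fields[j]:
--             i += 1
--         elif fields[j] < contacts[i]:
--             j += 1
--         else:
--             matched.append(contacts[i])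
--             i += 1
--             j += 1
--     return bool(matched), matched
-- ===== Notes on version B (the rewrite author's own statement) =====
-- stated objective: alternative
-- what changed: B replaces A's hash-set membership loop over field emails with a sorting-based algorithm: it sorts the deduplicated normalized contacts and the deduplicated parsed field emails once, then intersects the two sorted lists with a two-pointer merge, so the matches come out already sorted and no hash membership test or final sort is needed.
import Mathlib
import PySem

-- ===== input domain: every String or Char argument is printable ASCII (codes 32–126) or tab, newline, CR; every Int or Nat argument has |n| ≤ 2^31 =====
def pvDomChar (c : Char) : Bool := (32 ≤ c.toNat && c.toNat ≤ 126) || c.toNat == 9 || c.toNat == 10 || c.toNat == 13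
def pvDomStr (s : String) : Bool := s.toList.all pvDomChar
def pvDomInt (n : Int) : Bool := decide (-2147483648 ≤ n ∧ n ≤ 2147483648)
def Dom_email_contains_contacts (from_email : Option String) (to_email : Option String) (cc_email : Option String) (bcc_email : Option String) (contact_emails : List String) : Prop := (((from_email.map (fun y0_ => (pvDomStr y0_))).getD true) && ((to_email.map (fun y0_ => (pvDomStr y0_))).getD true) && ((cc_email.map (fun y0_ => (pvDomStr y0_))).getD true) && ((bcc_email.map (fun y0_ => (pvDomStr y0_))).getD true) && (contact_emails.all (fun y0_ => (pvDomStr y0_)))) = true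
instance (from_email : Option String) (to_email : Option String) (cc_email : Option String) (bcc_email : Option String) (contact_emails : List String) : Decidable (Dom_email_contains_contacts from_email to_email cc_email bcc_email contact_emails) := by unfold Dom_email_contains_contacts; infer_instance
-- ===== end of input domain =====

-- B (alternative): same parsing helper, but the matching uses a sorting-based algorithm — sort both deduplicated sides once and intersect them with a two-pointer merge — instead of A's hash-set membership loop followed by a final sort.


-- ===== PORT A =====
-- literal port of extract_email_addresses (A's helper); [1] after split('<') and [0] after
-- split('>') always exist under the guard / nonempty split, so getD/headD defaults are never used
def extractEmailsA (email_string : Option String) : List String :=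
  match email_string with
  | none => []
  | some s =>
    if s = "" then []
    else
      ((PySem.Str.split? s ",").getD []).foldl (fun emails part =>
        let email :=
          if PySem.Str.isIn "<" part && PySem.Str.isIn ">" part then
            PySem.Str.lower (PySem.Str.strip
              ((((PySem.Str.split? ((PySem.Str.split? part "<").getD [] |>.getD 1 "") ">").getD []).headD "")))
          else
            PySem.Str.lower (PySem.Str.strip part)
        if email ≠ "" && PySem.Str.isIn "@" email then emails ++ [email] else emails) []

def email_contains_contacts (from_email : Option String) (to_email : Option String) (cc_email : Option String) (bcc_email : Option String) (contact_emails : List String) : Bool × List String :=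
  if contact_emails = [] then (false, [])
  else
    let contact_set : PySem.Set String :=
      PySem.Set.ofList (contact_emails.map (fun email => PySem.Str.strip (PySem.Str.lower email)))
    let matched : PySem.Set String :=
      [from_email, to_email, cc_email, bcc_email].foldl (fun matched field =>
        match field with
        | none => matched
        | some s =>
          if s = "" then matched
          else
            (extractEmailsA (some s)).foldl (fun matched email =>
              if PySem.Set.contains contact_set email then PySem.Set.add matched email
              else matched) matched) PySem.Set.empty
    (decide (PySem.Set.len matched > 0), PySem.List.sorted matched (fun x => x) false)

-- ===== PORT B =====
-- B's helper: textually the same parsing helper (B keeps it unchanged)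
def extractEmailsB (email_string : Option String) : List String :=
  match email_string with
  | none => []
  | some s =>
    if s = "" then []
    else
      ((PySem.Str.split? s ",").getD []).foldl (fun emails part =>
        let email :=
          if PySem.Str.isIn "<" part && PySem.Str.isIn ">" part then
            PySem.Str.lower (PySem.Str.strip
              ((((PySem.Str.split? ((PySem.Str.split? part "<").getD [] |>.getD 1 "") ">").getD []).headD "")))
          else
            PySem.Str.lower (PySem.Str.strip part)
        if email ≠ "" && PySem.Str.isIn "@" email then emails ++ [email] else emails) []

-- B's two-pointer merge over the two sorted lists (the while loop of Source B)
def mergeInter : List String → List String → List String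
  | [], _ => []
  | _ :: _, [] => []
  | a :: as, b :: bs =>
    if a < b then mergeInter as (b :: bs)
    else if b < a then mergeInter (a :: as) bs
    else a :: mergeInter as bs

def email_contains_contacts_alt (from_email : Option String) (to_email : Option String) (cc_email : Option String) (bcc_email : Option String) (contact_emails : List String) : Bool × List String :=
  let contacts : List String :=
    PySem.List.sorted
      (PySem.Set.ofList (contact_emails.map (fun c => PySem.Str.strip (PySem.Str.lower c))))
      (fun x => x) false
  let fields : List String :=
    PySem.List.sorted
      (PySem.Set.ofList ([from_email, to_email, cc_email, bcc_email].flatMap extractEmailsB))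
      (fun x => x) false
  let matched : List String := mergeInter contacts fields
  (!matched.isEmpty, matched)

-- ===== PRECONDITION & SPEC =====
def Spec_email_contains_contacts (from_email : Option String) (to_email : Option String) (cc_email : Option String) (bcc_email : Option String) (contact_emails : List String) (out : Bool × List String) : Prop := out = email_contains_contacts_alt from_email to_email cc_email bcc_email contact_emails
instance (from_email : Option String) (to_email : Option String) (cc_email : Option String) (bcc_email : Option String) (contact_emails : List String) (out : Bool × List String) : Decidable (Spec_email_contains_contacts from_email to_email cc_email bcc_email contact_emails out) := by unfold Spec_email_contains_contacts; infer_instance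

-- ===== CLAIM =====
def Claim_equal_email_contains_contacts : Prop := ∀ (from_email : Option String) (to_email : Option String) (cc_email : Option String) (bcc_email : Option String) (contact_emails : List String), Dom_email_contains_contacts from_email to_email cc_email bcc_email contact_emails → Spec_email_contains_contacts from_email to_email cc_email bcc_email contact_emails (email_contains_contacts from_email to_email cc_email bcc_email contact_emails)

-- ===== LEMMAS AND PROOFS =====

theorem extractB_eq_A : extractEmailsB = extractEmailsA := rfl

theorem mem_foldl_filterAdd (cs : PySem.Set String) (L : List String) :
    ∀ (m : List String) (x : String),
      x ∈ L.foldl (fun matched email =>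
        if PySem.Set.contains cs email then PySem.Set.add matched email else matched) m ↔
      x ∈ m ∨ (x ∈ L ∧ x ∈ cs) := by
  induction L with
  | nil => intro m x; simp
  | cons a L ih =>
    intro m x
    rw [List.foldl_cons]
    by_cases h : PySem.Set.contains cs a = true
    · have ha : a ∈ cs := (PySem.Set.contains_iff cs a).mp h
      rw [if_pos h, ih]
      simp only [PySem.Set.mem_add, List.mem_cons]
      have haux : x = a → x ∈ cs := fun hy => hy ▸ ha
      tauto
    · have ha : a ∉ cs := fun hx => h ((PySem.Set.contains_iff cs a).mpr hx)
      rw [if_neg h, ih]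
      simp only [List.mem_cons]
      have haux : x = a → x ∈ cs → False := fun hy h2 => ha (hy ▸ h2)
      tauto

theorem nodup_foldl_filterAdd (cs : PySem.Set String) (L : List String) :
    ∀ (m : List String), m.Nodup →
      (L.foldl (fun matched email =>
        if PySem.Set.contains cs email then PySem.Set.add matched email else matched) m).Nodup := by
  induction L with
  | nil => intro m hm; exact hm
  | cons a L ih =>
    intro m hm
    rw [List.foldl_cons]
    by_cases h : PySem.Set.contains cs a = true
    · rw [if_pos h]; exact ih _ (PySem.Set.nodup_add m a hm)
    · rw [if_neg h]; exact ih _ hm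

theorem foldl_fields_eq_flatMap (cs : PySem.Set String) (fields : List (Option String)) :
    ∀ (m : List String),
      fields.foldl (fun matched field =>
        match field with
        | none => matched
        | some s =>
          if s = "" then matched
          else
            (extractEmailsA (some s)).foldl (fun matched email =>
              if PySem.Set.contains cs email then PySem.Set.add matched email
              else matched) matched) m
      = (fields.flatMap extractEmailsA).foldl (fun matched email =>
          if PySem.Set.contains cs email then PySem.Set.add matched email else matched) m := by
  induction fields with
  | nil => intro m; rfl
  | cons f fields ih =>
    intro m
    rw [List.foldl_cons, List.flatMap_cons, List.foldl_append, ih]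
    congr 1
    match f with
    | none => rfl
    | some s =>
      by_cases hs : s = ""
      · subst hs; rfl
      · simp only [if_neg hs]

theorem mergeInter_nil (Y : List String) : mergeInter [] Y = [] := by
  cases Y <;> simp [mergeInter]

theorem mergeInter_mem (X Y : List String) (hX : X.Pairwise (· < ·)) (hY : Y.Pairwise (· < ·)) :
    ∀ z, z ∈ mergeInter X Y ↔ z ∈ X ∧ z ∈ Y := by
  match X, Y with
  | [], Y => intro z; simp [mergeInter]
  | a :: as, [] => intro z; simp [mergeInter]
  | a :: as, b :: bs =>
    intro z
    have hX' : as.Pairwise (· < ·) := hX.tail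
    have hY' : bs.Pairwise (· < ·) := hY.tail
    by_cases hab : a < b
    · have hrw : mergeInter (a :: as) (b :: bs) = mergeInter as (b :: bs) := by
        simp [mergeInter, hab]
      rw [hrw, mergeInter_mem as (b :: bs) hX' hY]
      constructor
      · rintro ⟨h1, h2⟩; exact ⟨List.mem_cons_of_mem _ h1, h2⟩
      · rintro ⟨h1, h2⟩
        rcases List.mem_cons.mp h1 with h | h
        · subst h
          exfalso
          rcases List.mem_cons.mp h2 with h2' | h2'
          · subst h2'; exact lt_irrefl z hab
          · exact lt_irrefl z (lt_trans hab (List.rel_of_pairwise_cons hY h2'))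
        · exact ⟨h, h2⟩
    · by_cases hba : b < a
      · have hrw : mergeInter (a :: as) (b :: bs) = mergeInter (a :: as) bs := by
          simp [mergeInter, hab, hba]
        rw [hrw, mergeInter_mem (a :: as) bs hX hY']
        constructor
        · rintro ⟨h1, h2⟩; exact ⟨h1, List.mem_cons_of_mem _ h2⟩
        · rintro ⟨h1, h2⟩
          refine ⟨h1, ?_⟩
          rcases List.mem_cons.mp h2 with h | h
          · subst h
            exfalso
            rcases List.mem_cons.mp h1 with h1' | h1'
            · subst h1'; exact lt_irrefl z hba
            · exact lt_irrefl z (lt_trans hba (List.rel_of_pairwise_cons hX h1'))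
          · exact h
      · have heq : a = b := le_antisymm (not_lt.mp hba) (not_lt.mp hab)
        have hrw : mergeInter (a :: as) (b :: bs) = a :: mergeInter as bs := by
          simp [mergeInter, hab, hba]
        rw [hrw]
        simp only [List.mem_cons, mergeInter_mem as bs hX' hY']
        subst heq
        constructor
        · rintro (h | ⟨h1, h2⟩)
          · exact ⟨Or.inl h, Or.inl h⟩
          · exact ⟨Or.inr h1, Or.inr h2⟩
        · rintro ⟨h1 | h1, h2⟩
          · exact Or.inl h1
          · rcases h2 with h2 | h2
            · subst h2
              exact absurd (List.rel_of_pairwise_cons hX h1) (lt_irrefl z)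
            · exact Or.inr ⟨h1, h2⟩
termination_by X.length + Y.length

theorem mergeInter_pairwise (X Y : List String) (hX : X.Pairwise (· < ·)) (hY : Y.Pairwise (· < ·)) :
    (mergeInter X Y).Pairwise (· < ·) := by
  match X, Y with
  | [], Y => simp [mergeInter]
  | a :: as, [] => simp [mergeInter]
  | a :: as, b :: bs =>
    have hX' : as.Pairwise (· < ·) := hX.tail
    have hY' : bs.Pairwise (· < ·) := hY.tail
    by_cases hab : a < b
    · have hrw : mergeInter (a :: as) (b :: bs) = mergeInter as (b :: bs) := by
        simp [mergeInter, hab]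
      rw [hrw]; exact mergeInter_pairwise as (b :: bs) hX' hY
    · by_cases hba : b < a
      · have hrw : mergeInter (a :: as) (b :: bs) = mergeInter (a :: as) bs := by
          simp [mergeInter, hab, hba]
        rw [hrw]; exact mergeInter_pairwise (a :: as) bs hX hY'
      · have hrw : mergeInter (a :: as) (b :: bs) = a :: mergeInter as bs := by
          simp [mergeInter, hab, hba]
        rw [hrw]
        refine List.pairwise_cons.mpr ⟨?_, mergeInter_pairwise as bs hX' hY'⟩
        intro z hz
        exact List.rel_of_pairwise_cons hX ((mergeInter_mem as bs hX' hY' z).mp hz).1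
termination_by X.length + Y.length

theorem email_contains_contacts_spec : Claim_equal_email_contains_contacts := by
  intro from_email to_email cc_email bcc_email contact_emails _
  unfold Spec_email_contains_contacts
  by_cases hc : contact_emails = []
  · subst hc
    show email_contains_contacts from_email to_email cc_email bcc_email [] = _
    have hA : email_contains_contacts from_email to_email cc_email bcc_email [] = (false, []) := by
      simp [email_contains_contacts]
    have hC0 : PySem.List.sorted ([] : List String) (fun x => x) false = [] := rfl
    have hB : email_contains_contacts_alt from_email to_email cc_email bcc_email [] = (false, []) := by
      simp [email_contains_contacts_alt, hC0, mergeInter_nil]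
    rw [hA, hB]
  · simp only [email_contains_contacts, email_contains_contacts_alt, if_neg hc]
    rw [extractB_eq_A, foldl_fields_eq_flatMap]
    set CN : List String :=
      contact_emails.map (fun email => PySem.Str.strip (PySem.Str.lower email)) with hCN
    set cs : PySem.Set String := PySem.Set.ofList CN with hcs
    set FA : List String := [from_email, to_email, cc_email, bcc_email].flatMap extractEmailsA with hFA
    set M : List String := FA.foldl (fun matched email =>
      if PySem.Set.contains cs email then PySem.Set.add matched email else matched)
      PySem.Set.empty with hM
    set C : List String := PySem.List.sorted (PySem.Set.ofList CN) (fun x => x) false with hC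
    set F : List String := PySem.List.sorted (PySem.Set.ofList FA) (fun x => x) false with hF
    have hCpw : C.Pairwise (· < ·) := PySem.List.sorted_ofList_pairwise_lt CN
    have hFpw : F.Pairwise (· < ·) := PySem.List.sorted_ofList_pairwise_lt FA
    have hmemC : ∀ z, z ∈ C ↔ z ∈ CN := by
      intro z
      rw [hC, PySem.List.mem_sorted, PySem.Set.mem_ofList]
    have hmemF : ∀ z, z ∈ F ↔ z ∈ FA := by
      intro z
      rw [hF, PySem.List.mem_sorted, PySem.Set.mem_ofList]
    have hmemM : ∀ z, z ∈ M ↔ z ∈ FA ∧ z ∈ cs := by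
      intro z
      rw [hM, mem_foldl_filterAdd]
      simp [PySem.Set.empty]
    have hmemMerge : ∀ z, z ∈ mergeInter C F ↔ z ∈ M := by
      intro z
      rw [mergeInter_mem C F hCpw hFpw, hmemM, hmemC, hmemF, hcs, PySem.Set.mem_ofList]
      tauto
    have hndM : M.Nodup := nodup_foldl_filterAdd cs FA _ List.nodup_nil
    have hpwMerge : (mergeInter C F).Pairwise (· < ·) := mergeInter_pairwise C F hCpw hFpw
    have hndMerge : (mergeInter C F).Nodup := hpwMerge.imp ne_of_lt
    have hperm : (mergeInter C F).Perm M := by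
      rw [List.perm_ext_iff_of_nodup hndMerge hndM]
      exact hmemMerge
    have hsorted : PySem.List.sorted M (fun x => x) false = mergeInter C F :=
      PySem.List.sorted_eq_of_perm_of_pairwise_lt M (mergeInter C F) (fun x => x) hperm hpwMerge
    refine Prod.ext ?_ hsorted
    have hlen : M.length = (mergeInter C F).length := hperm.length_eq.symm
    by_cases hMe : M = []
    · have : mergeInter C F = [] := List.eq_nil_iff_forall_not_mem.mpr
        (fun x hx => (List.eq_nil_iff_forall_not_mem.mp hMe x) ((hmemMerge x).mp hx))
      simp [this, hMe, PySem.Set.len]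
    · have hpos : 0 < M.length := List.length_pos_iff.mpr hMe
      have : mergeInter C F ≠ [] := by
        intro h0
        rw [h0] at hlen
        simp at hlen
        exact hMe hlen
      simp [PySem.Set.len, hpos, this]
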